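-- pv_equiv track=rewrite | github.com/kafonek/aoc_2023 | python/aoc_2023/day09.py | next_diffs
-- ===== SOURCE A (Python) =====
-- from typing import List
--
-- def next_diffs(diff_hierarchy: List[List[int]]) -> List[int]:
--     """
--     Given a diff hierarchy, return a list of 'next results'
--
--     diff_hiearchy = [[0, 1, 2], [1, 1], [0]]
--     assert next_diffs(diff_hierarchy) == [3, 1]
--     """
--     results = []
--     to_add = diff_hierarchy[-1][-1] # should always be 0 in theory
--     for diff in reversed(diff_hierarchy[:-1]):
--         value = diff[-1] + to_add
--         results.append(value)
--         to_add = value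
--     return results
-- ===== SOURCE B (Python) =====
-- from typing import List
--
-- def next_diffs(diff_hierarchy: List[List[int]]) -> List[int]:
--     # Closed form: each result is the suffix sum of the last elements of the levels.
--     lasts = [d[-1] for d in diff_hierarchy]
--     return [sum(lasts[k:]) for k in range(len(diff_hierarchy) - 2, -1, -1)]
-- ===== Notes on version B (the rewrite author's own statement) =====
-- stated objective: alternative
-- what changed: B replaces A's hand-threaded running-sum accumulator loop over the reversed hierarchy by a closed form: extract the last element of every level once, then each result is the suffix sum of those last elements.
import Mathlib
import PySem

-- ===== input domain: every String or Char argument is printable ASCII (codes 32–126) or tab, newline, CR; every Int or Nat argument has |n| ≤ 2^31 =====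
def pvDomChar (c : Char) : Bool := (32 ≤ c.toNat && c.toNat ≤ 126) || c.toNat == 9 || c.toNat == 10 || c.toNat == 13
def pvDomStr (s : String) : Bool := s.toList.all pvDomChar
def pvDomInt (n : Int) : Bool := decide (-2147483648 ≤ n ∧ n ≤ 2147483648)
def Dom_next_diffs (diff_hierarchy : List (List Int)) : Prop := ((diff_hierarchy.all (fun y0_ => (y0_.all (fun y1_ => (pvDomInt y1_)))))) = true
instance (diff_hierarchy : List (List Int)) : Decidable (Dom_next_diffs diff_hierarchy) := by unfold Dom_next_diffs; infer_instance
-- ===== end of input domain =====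

-- B replaces A's running-sum accumulator loop by a closed form: each result is the
-- suffix sum of the last elements of the levels (same values, different decomposition).

-- ===== PORT A =====
-- results = []; to_add = dh[-1][-1]; for diff in reversed(dh[:-1]): value = diff[-1] + to_add; results.append(value); to_add = value
def next_diffs (diff_hierarchy : List (List Int)) : List Int :=
  match PySem.List.pyGet? diff_hierarchy (-1) with
  | none => []                            -- IndexError: excluded by Pre_
  | some lastLevel =>
    match PySem.List.pyGet? lastLevel (-1) with
    | none => []                          -- IndexError: excluded by Pre_
    | some toAdd0 =>
      ((PySem.List.slice diff_hierarchy none (some (-1))).reverse.foldl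
        (fun (st : List Int × Int) diff =>
          (st.1 ++ [PySem.List.pyGetD diff (-1) 0 + st.2],
           PySem.List.pyGetD diff (-1) 0 + st.2))   -- value = diff[-1] + to_add, appended and threaded
        ([], toAdd0)).1

-- ===== PORT B =====
-- lasts = [d[-1] for d in dh]; return [sum(lasts[k:]) for k in range(len(dh)-2, -1, -1)]
def next_diffs_alt (diff_hierarchy : List (List Int)) : List Int :=
  let lasts := diff_hierarchy.map (fun d => PySem.List.pyGetD d (-1) 0)  -- d[-1], in range under Pre_
  (PySem.List.pyRange ((diff_hierarchy.length : Int) - 2) (-1) (-1)).map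
    (fun k => (PySem.List.slice lasts (some k) none).sum)

-- ===== PRECONDITION & SPEC =====
-- Pre_ excludes exactly the inputs on which A raises IndexError: the empty hierarchy
-- (dh[-1]) and hierarchies containing an empty level (some d[-1]).
def Pre_next_diffs (diff_hierarchy : List (List Int)) : Prop :=
  diff_hierarchy ≠ [] ∧ ∀ d ∈ diff_hierarchy, d ≠ []
instance (diff_hierarchy : List (List Int)) : Decidable (Pre_next_diffs diff_hierarchy) := by
  unfold Pre_next_diffs; infer_instance
def pvWitness_next_diffs : List (List Int) := [[0, 1, 2], [1, 1], [0]]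

def Spec_next_diffs (diff_hierarchy : List (List Int)) (out : List Int) : Prop :=
  out = next_diffs_alt diff_hierarchy
instance (diff_hierarchy : List (List Int)) (out : List Int) : Decidable (Spec_next_diffs diff_hierarchy out) := by
  unfold Spec_next_diffs; infer_instance

-- ===== CLAIM (what is proved, stated in full; the proofs are below) =====
def Claim_equal_next_diffs : Prop := ∀ (diff_hierarchy : List (List Int)), Dom_next_diffs diff_hierarchy → Pre_next_diffs diff_hierarchy → Spec_next_diffs diff_hierarchy (next_diffs diff_hierarchy)

-- ===== LEMMAS AND PROOFS =====

/-- Last element of a level, as both ports read it. -/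
def lastv (d : List Int) : Int := PySem.List.pyGetD d (-1) 0

/-- The running-sum scan that A's loop produces from the reversed last-elements. -/
def gscan : List Int → Int → List Int
  | [], _ => []
  | x :: r, a => (x + a) :: gscan r (x + a)

theorem foldV (v : List Int) (res : List Int) (a : Int) :
    v.foldl (fun (st : List Int × Int) x => (st.1 ++ [x + st.2], x + st.2)) (res, a)
      = (res ++ gscan v a, a + v.sum) := by
  induction v generalizing res a with
  | nil => simp [gscan]
  | cons x r ih => simp [gscan, List.foldl_cons, ih]; omega

theorem gscan_eq (v : List Int) (a : Int) :
    gscan v a = (List.range v.length).map (fun i => a + (v.take (i + 1)).sum) := by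
  induction v generalizing a with
  | nil => simp [gscan]
  | cons x r ih =>
    simp [gscan, List.range_succ_eq_map, ih, Function.comp_def]
    refine ⟨by omega, ?_⟩
    intro i _
    omega

theorem next_diffs_spec_aux (dh : List (List Int)) (h : Pre_next_diffs dh) :
    next_diffs dh = next_diffs_alt dh := by
  obtain ⟨hne, hall⟩ := h
  set L := dh.map (fun d => PySem.List.pyGetD d (-1) 0) with hL
  have hlastne : dh.getLast hne ≠ [] := hall _ (List.getLast_mem hne)
  have h1 : PySem.List.pyGet? dh (-1) = some (dh.getLast hne) := by
    rw [PySem.List.pyGet?_neg_one, List.getLast?_eq_getLast_of_ne_nil hne]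
  have h2 : PySem.List.pyGet? (dh.getLast hne) (-1)
      = some ((dh.getLast hne).getLast hlastne) := by
    rw [PySem.List.pyGet?_neg_one, List.getLast?_eq_getLast_of_ne_nil hlastne]
  set P := dh.dropLast.map lastv with hP
  set a := lastv (dh.getLast hne) with ha
  have hseed : (dh.getLast hne).getLast hlastne = a := by
    rw [ha, lastv, PySem.List.pyGetD_neg_one _ _ hlastne]
  have hLP : L = P ++ [a] := by
    rw [hL, hP, ha]
    show List.map lastv dh = List.map lastv dh.dropLast ++ [lastv (dh.getLast hne)]
    conv_lhs => rw [← List.dropLast_append_getLast hne]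
    simp
  have hPlen : P.length = dh.length - 1 := by simp [hP]
  -- A's loop is gscan over the reversed last-values
  have hA : next_diffs dh = gscan P.reverse a := by
    simp only [next_diffs, h1, h2, PySem.List.slice_to_neg_one, hseed]
    have key := congrArg Prod.fst (foldV (dh.dropLast.reverse.map lastv) [] a)
    rw [List.foldl_map] at key
    simp only [List.nil_append] at key
    rw [List.map_reverse, ← hP] at key
    exact key
  -- B with its countdown range rewritten to List.range
  have hB : next_diffs_alt dh
      = (List.range (dh.length - 1)).map
          (fun k : Nat => (PySem.List.slice L (some ((dh.length : Int) - 2 - k)) none).sum) := by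
    simp only [next_diffs_alt, ← hL]
    rw [PySem.List.pyRange_neg_one]
    rw [show ((dh.length : Int) - 2 - -1).toNat = dh.length - 1 from by omega]
    rw [List.map_map]
    simp [Function.comp_def]
  rw [hA, hB, gscan_eq]
  have hlenPr : P.reverse.length = dh.length - 1 := by simp [hPlen]
  rw [hlenPr]
  refine List.map_congr_left (fun i hi => ?_)
  rw [List.mem_range] at hi
  have hn1 : 1 ≤ dh.length := List.length_pos_iff.mpr hne
  have hge : (0 : Int) ≤ (dh.length : Int) - 2 - i := by omega
  rw [PySem.List.slice_from _ hge]
  rw [show ((dh.length : Int) - 2 - i).toNat = dh.length - 2 - i from by omega, hLP]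
  rw [List.drop_append_of_le_length (by omega), List.sum_append]
  rw [List.take_reverse, List.sum_reverse]
  rw [show P.length - (i + 1) = dh.length - 2 - i from by omega]
  simp
  omega

-- ===== VERDICT (by name: the statement is the Claim_ definition above) =====
theorem next_diffs_spec : Claim_equal_next_diffs := by
  intro dh _ hpre
  unfold Spec_next_diffs
  exact next_diffs_spec_aux dh hpre
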